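-- pv_equiv track=rewrite | github.com/mofanx/multi_ai_assistant | ai_assistant/model_factory.py | _fallback_model_detection
-- ===== SOURCE A (Python) =====
-- from typing import Dict, Optional
--
-- def _fallback_model_detection(model_name: str) -> Dict[str, str]:
--     """备用模型类型检测方法（基于模型名称）"""
--     model_name_lower = model_name.lower()
--
--     # 基于模型名称的检测规则
--     if any(keyword in model_name_lower for keyword in ["embedding", "embed"]):
--         return {
--             "type": "embedding",
--             "category": "📊 嵌入模型",
--             "mode": "embedding",
--             "description": "向量嵌入模型"
--         }
--     elif any(keyword in model_name_lower for keyword in ["image", "dall", "stable-diffusion", "midjourney", "sdxl"]):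
--         return {
--             "type": "image",
--             "category": "🎨 图像生成",
--             "mode": "image",
--             "description": "图像生成模型"
--         }
--     elif any(keyword in model_name_lower for keyword in ["whisper", "tts", "speech", "audio", "voice"]):
--         return {
--             "type": "audio",
--             "category": "🔊 语音模型",
--             "mode": "audio",
--             "description": "音频处理模型"
--         }
--     elif any(keyword in model_name_lower for keyword in ["code", "codex", "copilot"]):
--         return {
--             "type": "code",
--             "category": "💻 代码模型",
--             "mode": "code",
--             "description": "代码生成模型"
--         }
--     elif any(keyword in model_name_lower for keyword in ["translate", "translation"]):
--         return {
--             "type": "translation",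
--             "category": "🌐 翻译模型",
--             "mode": "translation",
--             "description": "翻译模型"
--         }
--     elif any(keyword in model_name_lower for keyword in ["gemini", "gpt-4-vision", "claude-3", "multimodal"]):
--         return {
--             "type": "multimodal",
--             "category": "🔍 多模态模型",
--             "mode": "multimodal",
--             "description": "多模态处理模型"
--         }
--     else:
--         # 默认为对话模型
--         return {
--             "type": "chat",
--             "category": "💬 对话模型",
--             "mode": "chat",
--             "description": "通用对话模型"
--         }
-- ===== SOURCE B (Python) =====
-- from typing import Dict
--
-- # Flat keyword -> priority map (one entry per keyword; lower number = higher priority).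
-- _KEYWORD_PRIORITY = {
--     "embedding": 0, "embed": 0,
--     "image": 1, "dall": 1, "stable-diffusion": 1, "midjourney": 1, "sdxl": 1,
--     "whisper": 2, "tts": 2, "speech": 2, "audio": 2, "voice": 2,
--     "code": 3, "codex": 3, "copilot": 3,
--     "translate": 4, "translation": 4,
--     "gemini": 5, "gpt-4-vision": 5, "claude-3": 5, "multimodal": 5,
-- }
--
-- # Result templates indexed by priority; index 6 is the chat default.
-- _TEMPLATES = [
--     {"type": "embedding", "category": "📊 嵌入模型", "mode": "embedding", "description": "向量嵌入模型"},
--     {"type": "image", "category": "🎨 图像生成", "mode": "image", "description": "图像生成模型"},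
--     {"type": "audio", "category": "🔊 语音模型", "mode": "audio", "description": "音频处理模型"},
--     {"type": "code", "category": "💻 代码模型", "mode": "code", "description": "代码生成模型"},
--     {"type": "translation", "category": "🌐 翻译模型", "mode": "translation", "description": "翻译模型"},
--     {"type": "multimodal", "category": "🔍 多模态模型", "mode": "multimodal", "description": "多模态处理模型"},
--     {"type": "chat", "category": "💬 对话模型", "mode": "chat", "description": "通用对话模型"},
-- ]
--
--
-- def _fallback_model_detection(model_name: str) -> Dict[str, str]:
--     lowered = model_name.lower()
--     best = 6  # default: chat
--     for keyword, priority in _KEYWORD_PRIORITY.items():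
--         if keyword in lowered:
--             best = min(best, priority)
--     return dict(_TEMPLATES[best])
-- ===== Notes on version B (the rewrite author's own statement) =====
-- stated objective: alternative
-- what changed: Replaced the ordered six-branch short-circuit if/elif chain by a min-aggregation: every keyword in one flat keyword-to-priority map is tested and the minimum matched priority indexes a template array (default 6 = chat).
import Mathlib
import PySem

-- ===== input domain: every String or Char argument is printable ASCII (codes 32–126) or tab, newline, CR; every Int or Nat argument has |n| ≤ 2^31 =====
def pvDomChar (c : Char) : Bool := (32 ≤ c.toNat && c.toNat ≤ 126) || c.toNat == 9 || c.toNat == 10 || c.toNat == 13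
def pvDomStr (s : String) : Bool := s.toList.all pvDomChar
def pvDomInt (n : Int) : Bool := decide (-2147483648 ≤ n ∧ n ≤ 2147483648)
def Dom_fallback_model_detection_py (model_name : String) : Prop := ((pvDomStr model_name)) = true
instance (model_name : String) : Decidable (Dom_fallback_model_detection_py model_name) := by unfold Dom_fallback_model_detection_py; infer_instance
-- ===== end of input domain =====

-- B replaces A's ordered six-branch if/elif chain by a min-aggregation over a flat
-- keyword->priority map, indexing a template array by the minimum matched priority
-- (objective: alternative; both total; equivalence is exact).

-- ===== PORT A =====
-- Literal transliteration of A's if/elif chain.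
def fallback_model_detection_py (model_name : String) : List (String × String) :=
  let model_name_lower := PySem.Str.lower model_name
  if ["embedding", "embed"].any (fun k => PySem.Str.isIn k model_name_lower) then
    [("type", "embedding"), ("category", "📊 嵌入模型"), ("mode", "embedding"), ("description", "向量嵌入模型")]
  else if ["image", "dall", "stable-diffusion", "midjourney", "sdxl"].any (fun k => PySem.Str.isIn k model_name_lower) then
    [("type", "image"), ("category", "🎨 图像生成"), ("mode", "image"), ("description", "图像生成模型")]
  else if ["whisper", "tts", "speech", "audio", "voice"].any (fun k => PySem.Str.isIn k model_name_lower) then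
    [("type", "audio"), ("category", "🔊 语音模型"), ("mode", "audio"), ("description", "音频处理模型")]
  else if ["code", "codex", "copilot"].any (fun k => PySem.Str.isIn k model_name_lower) then
    [("type", "code"), ("category", "💻 代码模型"), ("mode", "code"), ("description", "代码生成模型")]
  else if ["translate", "translation"].any (fun k => PySem.Str.isIn k model_name_lower) then
    [("type", "translation"), ("category", "🌐 翻译模型"), ("mode", "translation"), ("description", "翻译模型")]
  else if ["gemini", "gpt-4-vision", "claude-3", "multimodal"].any (fun k => PySem.Str.isIn k model_name_lower) then
    [("type", "multimodal"), ("category", "🔍 多模态模型"), ("mode", "multimodal"), ("description", "多模态处理模型")]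
  else
    [("type", "chat"), ("category", "💬 对话模型"), ("mode", "chat"), ("description", "通用对话模型")]

-- ===== PORT B =====
-- _KEYWORD_PRIORITY: the flat keyword -> priority association list (dict in Source B).
def pvKeywordPriority : List (String × Nat) :=
  [("embedding", 0), ("embed", 0),
   ("image", 1), ("dall", 1), ("stable-diffusion", 1), ("midjourney", 1), ("sdxl", 1),
   ("whisper", 2), ("tts", 2), ("speech", 2), ("audio", 2), ("voice", 2),
   ("code", 3), ("codex", 3), ("copilot", 3),
   ("translate", 4), ("translation", 4),
   ("gemini", 5), ("gpt-4-vision", 5), ("claude-3", 5), ("multimodal", 5)]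

-- _TEMPLATES: result templates indexed by priority; index 6 is the chat default.
def pvTemplates : List (List (String × String)) :=
  [ [("type", "embedding"), ("category", "📊 嵌入模型"), ("mode", "embedding"), ("description", "向量嵌入模型")],
    [("type", "image"), ("category", "🎨 图像生成"), ("mode", "image"), ("description", "图像生成模型")],
    [("type", "audio"), ("category", "🔊 语音模型"), ("mode", "audio"), ("description", "音频处理模型")],
    [("type", "code"), ("category", "💻 代码模型"), ("mode", "code"), ("description", "代码生成模型")],
    [("type", "translation"), ("category", "🌐 翻译模型"), ("mode", "translation"), ("description", "翻译模型")],
    [("type", "multimodal"), ("category", "🔍 多模态模型"), ("mode", "multimodal"), ("description", "多模态处理模型")],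
    [("type", "chat"), ("category", "💬 对话模型"), ("mode", "chat"), ("description", "通用对话模型")] ]

-- Source B's loop: best = 6; for each keyword, best = min(best, priority) if it occurs.
def pvBestStep (lowered : String) (acc : Nat) (kp : String × Nat) : Nat :=
  if PySem.Str.isIn kp.1 lowered then min acc kp.2 else acc

def fallback_model_detection_py_alt (model_name : String) : List (String × String) :=
  let lowered := PySem.Str.lower model_name
  let best := pvKeywordPriority.foldl (pvBestStep lowered) 6
  -- _TEMPLATES[best]: best is always ≤ 6, so the index is in range; getD is exact here.
  pvTemplates.getD best []

-- ===== PRECONDITION & SPEC =====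
def Spec_fallback_model_detection_py (model_name : String) (out : List (String × String)) : Prop := out = fallback_model_detection_py_alt model_name
instance (model_name : String) (out : List (String × String)) : Decidable (Spec_fallback_model_detection_py model_name out) := by unfold Spec_fallback_model_detection_py; infer_instance

-- ===== CLAIM (what is proved, stated in full; the proofs are below) =====
def Claim_equal_fallback_model_detection_py : Prop := ∀ (model_name : String), Dom_fallback_model_detection_py model_name → Spec_fallback_model_detection_py model_name (fallback_model_detection_py model_name)

-- ===== LEMMAS AND PROOFS =====

-- Folding pvBestStep over one group of keywords all carrying the same priority i
-- yields `min acc i` iff some keyword of the group occurs, else `acc`.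
theorem pvFoldGroup (L : String) (i : Nat) (kws : List String) (acc : Nat) :
    (kws.map (fun k => (k, i))).foldl (pvBestStep L) acc
      = if kws.any (fun k => PySem.Str.isIn k L) then min acc i else acc := by
  induction kws generalizing acc with
  | nil => simp
  | cons k ks ih =>
      simp only [List.map_cons, List.foldl_cons, List.any_cons, pvBestStep]
      by_cases h : PySem.Str.isIn k L = true
      · simp only [h, if_true, Bool.true_or, ih]
        split <;> simp
      · have h' : PySem.Str.isIn k L = false := by
          exact Bool.not_eq_true _ |>.mp h
        simp only [h', Bool.false_eq_true, if_false, Bool.false_or, ih]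

set_option maxHeartbeats 2000000 in
theorem fallback_model_detection_py_spec : Claim_equal_fallback_model_detection_py := by
  intro model_name _
  unfold Spec_fallback_model_detection_py fallback_model_detection_py fallback_model_detection_py_alt
  set L := PySem.Str.lower model_name with hL
  -- pvKeywordPriority is definitionally the concatenation of the six keyword groups.
  have hsplit : pvKeywordPriority
      = (["embedding", "embed"].map (fun k => (k, 0)))
        ++ (["image", "dall", "stable-diffusion", "midjourney", "sdxl"].map (fun k => (k, 1)))
        ++ (["whisper", "tts", "speech", "audio", "voice"].map (fun k => (k, 2)))
        ++ (["code", "codex", "copilot"].map (fun k => (k, 3)))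
        ++ (["translate", "translation"].map (fun k => (k, 4)))
        ++ (["gemini", "gpt-4-vision", "claude-3", "multimodal"].map (fun k => (k, 5))) := rfl
  rw [hsplit]
  simp only [List.foldl_append, pvFoldGroup]
  by_cases h0 : ["embedding", "embed"].any (fun k => PySem.Str.isIn k L) = true <;>
  by_cases h1 : ["image", "dall", "stable-diffusion", "midjourney", "sdxl"].any (fun k => PySem.Str.isIn k L) = true <;>
  by_cases h2 : ["whisper", "tts", "speech", "audio", "voice"].any (fun k => PySem.Str.isIn k L) = true <;>
  by_cases h3 : ["code", "codex", "copilot"].any (fun k => PySem.Str.isIn k L) = true <;>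
  by_cases h4 : ["translate", "translation"].any (fun k => PySem.Str.isIn k L) = true <;>
  by_cases h5 : ["gemini", "gpt-4-vision", "claude-3", "multimodal"].any (fun k => PySem.Str.isIn k L) = true <;>
  simp only [h0, h1, h2, h3, h4, h5, if_true] <;>
  rfl
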